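-- pv_equiv track=rewrite | github.com/Thapha/Top-Secret | M88SUT/recognize.py | stringProcess
-- ===== SOURCE A (Python) =====
-- def stringProcess(str):
--     str = str[4:]
--     count = 0
--     index = 0
--     i=0
--     for c in str:
--         if c == '.':
--             count = count + 1
--             index=i
--         i = i+1
--
--     if count > 1:
--         return str[:index]
--     else:
--         return str
-- ===== SOURCE B (Python) =====
-- def stringProcess(str):
--     s = str[4:]
--     parts = s.split('.')
--     if len(parts) > 2:
--         return '.'.join(parts[:-1])
--     return s
-- ===== Notes on version B (the rewrite author's own statement) =====
-- stated objective: idiomatic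
-- what changed: Replaces the manual character loop that counts dots and tracks the last dot's index with a tokenize-and-rejoin decomposition: split on the dot separator, test whether there are more than two parts, and rejoin all but the last part.
import Mathlib
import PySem

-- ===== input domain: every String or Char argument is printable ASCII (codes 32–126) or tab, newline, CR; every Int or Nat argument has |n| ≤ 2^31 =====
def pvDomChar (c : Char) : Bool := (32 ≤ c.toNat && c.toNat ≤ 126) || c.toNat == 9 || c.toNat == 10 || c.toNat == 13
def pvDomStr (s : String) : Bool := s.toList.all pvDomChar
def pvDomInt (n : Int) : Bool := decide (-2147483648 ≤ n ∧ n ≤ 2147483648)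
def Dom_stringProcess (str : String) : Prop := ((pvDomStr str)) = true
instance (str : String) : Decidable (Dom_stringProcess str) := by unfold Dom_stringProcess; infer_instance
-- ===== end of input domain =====

-- B replaces A's manual dot-counting/last-index loop by a split-and-rejoin decomposition (idiomatic; a timing run measured it faster via the C-level split).


-- ===== PORT A =====
-- A's loop body: state (count, index, i); 'if c == '.': count += 1; index = i' then 'i += 1'
def pvStepA (acc : Int × Int × Int) (c : Char) : Int × Int × Int :=
  if c = '.' then (acc.1 + 1, acc.2.2, acc.2.2 + 1)
  else (acc.1, acc.2.1, acc.2.2 + 1)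

def stringProcess (str : String) : String :=
  let s := PySem.Str.slice str (some 4) none
  let st := s.toList.foldl pvStepA (0, 0, 0)
  if st.1 > 1 then PySem.Str.slice s none (some st.2.1) else s

-- ===== PORT B =====
-- hand port of s.split('.') for the one-character separator '.' (Python-exact: split of "" is [""])
def splitDotB : List Char → List (List Char)
  | [] => [[]]
  | c :: cs =>
    if c = '.' then [] :: splitDotB cs
    else
      match splitDotB cs with
      | p :: ps => (c :: p) :: ps
      | [] => [[c]]

def stringProcess_alt (str : String) : String :=
  let s := PySem.Str.slice str (some 4) none
  let parts := splitDotB s.toList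
  if parts.length > 2 then String.ofList (PySem.Chars.join ['.'] parts.dropLast) else s

-- ===== PRECONDITION & SPEC =====
def Spec_stringProcess (str : String) (out : String) : Prop := out = stringProcess_alt str
instance (str : String) (out : String) : Decidable (Spec_stringProcess str out) := by unfold Spec_stringProcess; infer_instance

-- ===== CLAIM (what is proved, stated in full; the proofs are below) =====
def Claim_equal_stringProcess : Prop := ∀ (str : String), Dom_stringProcess str → Spec_stringProcess str (stringProcess str)

-- ===== LEMMAS AND PROOFS =====

theorem splitDotB_ne_nil (l : List Char) : splitDotB l ≠ [] := by
  cases l with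
  | nil => simp [splitDotB]
  | cons c cs =>
    simp only [splitDotB]
    split
    · simp
    · cases h : splitDotB cs <;> simp

theorem splitDotB_length (l : List Char) :
    (splitDotB l).length = l.count '.' + 1 := by
  induction l with
  | nil => simp [splitDotB]
  | cons c cs ih =>
    by_cases hc : c = '.'
    · simp [splitDotB, hc, ih]
    · simp only [splitDotB, if_neg hc]
      cases h : splitDotB cs with
      | nil => exact absurd h (splitDotB_ne_nil cs)
      | cons p ps => simp [hc, ← ih, h]

theorem splitDotB_no_dot (ys : List Char) (hy : '.' ∉ ys) : splitDotB ys = [ys] := by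
  induction ys with
  | nil => simp [splitDotB]
  | cons d ds ih =>
    have hd : d ≠ '.' := fun h => hy (by simp [h])
    have h' : '.' ∉ ds := fun h => hy (by simp [h])
    simp [splitDotB, hd, ih h']

theorem join_splitDotB (l : List Char) :
    PySem.Chars.join ['.'] (splitDotB l) = l := by
  induction l with
  | nil => simp [splitDotB, PySem.Chars.join_singleton]
  | cons c cs ih =>
    by_cases hc : c = '.'
    · cases h : splitDotB cs with
      | nil => exact absurd h (splitDotB_ne_nil cs)
      | cons p ps =>
        rw [h] at ih
        subst hc
        simp only [splitDotB, if_true, h]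
        rw [PySem.Chars.join_cons_cons, ih]
        simp
    · cases h : splitDotB cs with
      | nil => exact absurd h (splitDotB_ne_nil cs)
      | cons p ps =>
        rw [h] at ih
        simp only [splitDotB, if_neg hc, h]
        cases ps with
        | nil => rw [PySem.Chars.join_singleton] at ih ⊢; simp [ih]
        | cons q qs =>
          rw [PySem.Chars.join_cons_cons] at ih ⊢
          simp [ih]

theorem splitDotB_append_last (xs ys : List Char) (hy : '.' ∉ ys) :
    splitDotB (xs ++ '.' :: ys) = splitDotB xs ++ [ys] := by
  induction xs with
  | nil => simp [splitDotB, splitDotB_no_dot ys hy]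
  | cons c cs ih =>
    by_cases hc : c = '.'
    · simp [splitDotB, hc, ih]
    · simp only [List.cons_append, splitDotB, if_neg hc, ih]
      cases h : splitDotB cs with
      | nil => exact absurd h (splitDotB_ne_nil cs)
      | cons p ps => simp

-- A's fold: count component counts dots, position component is the length so far
theorem foldA_count_pos (l : List Char) (acc : Int × Int × Int) :
    (l.foldl pvStepA acc).1 = acc.1 + l.count '.' ∧
    (l.foldl pvStepA acc).2.2 = acc.2.2 + l.length := by
  induction l generalizing acc with
  | nil => simp
  | cons c cs ih =>
    by_cases hc : c = '.'
    · obtain ⟨h1, h2⟩ := ih (acc.1 + 1, acc.2.2, acc.2.2 + 1)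
      rw [List.foldl_cons, show pvStepA acc c = (acc.1 + 1, acc.2.2, acc.2.2 + 1) by
        simp [pvStepA, hc]]
      refine ⟨?_, ?_⟩
      · rw [h1]; simp [hc]; push_cast; ring
      · rw [h2]; simp; omega
    · obtain ⟨h1, h2⟩ := ih (acc.1, acc.2.1, acc.2.2 + 1)
      rw [List.foldl_cons, show pvStepA acc c = (acc.1, acc.2.1, acc.2.2 + 1) by
        simp [pvStepA, hc]]
      refine ⟨?_, ?_⟩
      · rw [h1]; simp [hc]
      · rw [h2]; simp; omega

-- fold over a dot-free suffix keeps count and index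
theorem foldA_no_dot (l : List Char) (acc : Int × Int × Int) (h : '.' ∉ l) :
    (l.foldl pvStepA acc).1 = acc.1 ∧ (l.foldl pvStepA acc).2.1 = acc.2.1 := by
  induction l generalizing acc with
  | nil => simp
  | cons c cs ih =>
    have hc : c ≠ '.' := fun hh => h (by simp [hh])
    have h' : '.' ∉ cs := fun hh => h (by simp [hh])
    obtain ⟨h1, h2⟩ := ih (acc.1, acc.2.1, acc.2.2 + 1) h'
    rw [List.foldl_cons, show pvStepA acc c = (acc.1, acc.2.1, acc.2.2 + 1) by
      simp [pvStepA, hc]]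
    exact ⟨h1, h2⟩

-- split at the last dot
theorem exists_last_dot (l : List Char) (h : '.' ∈ l) :
    ∃ xs ys, l = xs ++ '.' :: ys ∧ '.' ∉ ys := by
  induction l using List.reverseRecOn with
  | nil => simp at h
  | append_singleton s c ih =>
    by_cases hc : c = '.'
    · exact ⟨s, [], by simp [hc], by simp⟩
    · have hs : '.' ∈ s := by
        rcases List.mem_append.mp h with h' | h'
        · exact h'
        · simp at h'; exact absurd h'.symm hc
      obtain ⟨xs, ys, heq, hy⟩ := ih hs
      exact ⟨xs, ys ++ [c], by simp [heq], by
        intro hm; rcases List.mem_append.mp hm with h' | h'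
        · exact hy h'
        · simp at h'; exact hc h'.symm⟩

theorem main_lemma (t : List Char) :
    (if ((t.foldl pvStepA (0, 0, 0)).1 > 1)
       then PySem.List.slice t none (some (t.foldl pvStepA (0, 0, 0)).2.1)
       else t) =
    (if (splitDotB t).length > 2
       then PySem.Chars.join ['.'] (splitDotB t).dropLast
       else t) := by
  have hcount := (foldA_count_pos t (0, 0, 0)).1
  by_cases hgt : (t.count '.' : Int) > 1
  · -- at least two dots: decompose at the last one
    have hmem : '.' ∈ t :=
      List.count_pos_iff.mp (by exact_mod_cast (by omega : 0 < (t.count '.' : Int)))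
    obtain ⟨xs, ys, heq, hy⟩ := exists_last_dot t hmem
    subst heq
    have hc2 : (xs ++ '.' :: ys).count '.' = xs.count '.' + ys.count '.' + 1 := by
      simp [List.count_append]
      try omega
    have hyc : ys.count '.' = 0 := List.count_eq_zero.mpr hy
    have hgt' : (xs ++ '.' :: ys).count '.' > 1 := by exact_mod_cast hgt
    -- A's last-dot index = xs.length
    have hfold : ((xs ++ '.' :: ys).foldl pvStepA (0, 0, 0)).2.1 = (xs.length : Int) := by
      rw [show xs ++ '.' :: ys = (xs ++ ['.']) ++ ys by simp, List.foldl_append]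
      rw [(foldA_no_dot ys _ hy).2, List.foldl_append]
      have hpos := (foldA_count_pos xs (0, 0, 0)).2
      simp only [List.foldl_cons, List.foldl_nil, pvStepA, if_true]
      simpa using hpos
    rw [if_pos (by rw [hcount]; omega :
        ((xs ++ '.' :: ys).foldl pvStepA (0, 0, 0)).1 > 1), hfold]
    rw [splitDotB_append_last xs ys hy]
    have hlen : (splitDotB xs ++ [ys]).length > 2 := by
      have h1 := splitDotB_length xs
      simp only [List.length_append, List.length_cons, List.length_nil, h1]
      omega
    rw [if_pos hlen, show (splitDotB xs ++ [ys]).dropLast = splitDotB xs by simp,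
        join_splitDotB]
    rw [PySem.List.slice_to _ (by positivity)]
    simp
  · rw [if_neg (by rw [hcount]; omega), if_neg (by rw [splitDotB_length]; omega)]

theorem main_str (s : String) :
    (if ((s.toList.foldl pvStepA (0, 0, 0)).1 > 1)
       then PySem.Str.slice s none (some (s.toList.foldl pvStepA (0, 0, 0)).2.1)
       else s) =
    (if (splitDotB s.toList).length > 2
       then String.ofList (PySem.Chars.join ['.'] (splitDotB s.toList).dropLast)
       else s) := by
  apply String.toList_inj.mp
  rw [apply_ite String.toList, apply_ite String.toList, String.toList_ofList]
  rw [PySem.Str.toList_slice]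
  exact main_lemma s.toList

-- ===== VERDICT (by name: the statement is the Claim_ definition above) =====
theorem stringProcess_spec : Claim_equal_stringProcess := by
  intro str _
  unfold Spec_stringProcess stringProcess stringProcess_alt
  exact main_str (PySem.Str.slice str (some 4) none)
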